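-- pv_equiv track=rewrite | github.com/waterbear-cloud/paco | src/paco/cftemplates/cftemplates.py | gen_cf_logical_name
-- ===== SOURCE A (Python) =====
-- def gen_cf_logical_name(name, sep=None):
--     """
--     !! DEPRECATED !! Use self.cfn_logical_id* methods
--     Create a CloudFormation safe Logical name
--     """
--
--     sep_list = ['_','-','@','.']
--     if sep != None:
--         sep_list = [sep]
--     for sep in sep_list:
--         cf_name = ""
--         for name_item in name.split(sep):
--             if len(name_item) > 1:
--                 cf_name += name_item[0].upper() + name_item[1:]
--             else:
--                 cf_name += name_item.upper()
--         name = cf_name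
--     cf_name = cf_name.replace('-','')
--
--     return cf_name
-- ===== SOURCE B (Python) =====
-- def gen_cf_logical_name(name, sep=None):
--     if sep is not None:
--         cf_name = ''.join(p[:1].upper() + p[1:] for p in name.split(sep))
--         return cf_name.replace('-', '')
--     out = []
--     cap = True
--     for ch in name:
--         if ch in '_-@.':
--             cap = True
--         else:
--             out.append(ch.upper() if cap else ch)
--             cap = False
--     return ''.join(out)
-- ===== Notes on version B (the rewrite author's own statement) =====
-- stated objective: simpler
-- what changed: For the default separators B replaces A's four sequential split-capitalize-rejoin passes (plus a final replace) by one single left-to-right character scan with a capitalize-next flag that drops separators as it goes; for an explicit separator B builds the result as one join over a generator instead of A's accumulator loop.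
import Mathlib
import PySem

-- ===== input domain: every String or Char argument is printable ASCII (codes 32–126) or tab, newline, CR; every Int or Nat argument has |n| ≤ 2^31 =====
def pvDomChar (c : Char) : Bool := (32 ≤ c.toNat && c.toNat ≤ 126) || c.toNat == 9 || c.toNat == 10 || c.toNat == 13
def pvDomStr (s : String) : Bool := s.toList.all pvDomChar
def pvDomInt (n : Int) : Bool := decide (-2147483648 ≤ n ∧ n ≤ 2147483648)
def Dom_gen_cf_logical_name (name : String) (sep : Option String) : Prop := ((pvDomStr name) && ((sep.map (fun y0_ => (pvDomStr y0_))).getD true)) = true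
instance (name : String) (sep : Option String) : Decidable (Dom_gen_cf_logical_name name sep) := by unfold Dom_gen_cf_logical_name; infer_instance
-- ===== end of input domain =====

-- B replaces A's four sequential split/capitalize/rejoin passes (default separators) by one
-- single left-to-right scan with a capitalize-next flag; objective: simpler.

-- ===== PORT A =====
-- name_item[0].upper() + name_item[1:]  /  name_item.upper()
def pvCapA (item : List Char) : List Char :=
  if 1 < item.length then
    ((PySem.List.pyGet? item 0).map (fun c => [PySem.Chars.upperChar c])).getD []
      ++ PySem.List.slice item (some 1) none
  else PySem.Chars.upper item

def gen_cf_logical_name (name : String) (sep : Option String) : String :=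
  let sepList : List (List Char) :=
    match sep with
    | none => [['_'], ['-'], ['@'], ['.']]
    | some s => [s.toList]
  -- for sep in sep_list: cf_name = ""; for name_item in name.split(sep): cf_name += …; name = cf_name
  -- (split? is none only for sep = "", where Python raises ValueError; excluded by Pre_)
  let finalName : List Char :=
    sepList.foldl
      (fun nm sp =>
        ((PySem.Chars.split? nm sp).getD []).foldl (fun cf item => cf ++ pvCapA item) [])
      name.toList
  String.ofList (PySem.Chars.replace finalName ['-'] [])

-- ===== PORT B =====
-- p[:1].upper() + p[1:]
def pvCapB (item : List Char) : List Char :=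
  PySem.Chars.upper (PySem.List.slice item none (some 1)) ++ PySem.List.slice item (some 1) none

-- B's for-loop over the characters: drop separators, capitalize-next flag
def pvScan (seps : List Char) : Bool → List Char → List Char
  | _, [] => []
  | cap, c :: rest =>
    if c ∈ seps then pvScan seps true rest
    else (if cap then PySem.Chars.upperChar c else c) :: pvScan seps false rest

def gen_cf_logical_name_alt (name : String) (sep : Option String) : String :=
  match sep with
  | some s =>
      let cf := PySem.Chars.join [] (((PySem.Chars.split? name.toList s.toList).getD []).map pvCapB)
      String.ofList (PySem.Chars.replace cf ['-'] [])
  | none => String.ofList (pvScan ['_', '-', '@', '.'] true name.toList)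

-- ===== PRECONDITION & SPEC =====
-- Pre_ excludes only sep = some "": there Python's name.split("") raises ValueError (in A and in B alike).
def Pre_gen_cf_logical_name (name : String) (sep : Option String) : Prop := sep ≠ some ""
instance (name : String) (sep : Option String) : Decidable (Pre_gen_cf_logical_name name sep) := by
  unfold Pre_gen_cf_logical_name; infer_instance

def pvWitness_gen_cf_logical_name : String × Option String := ("hello_world.app-x", none)

def Spec_gen_cf_logical_name (name : String) (sep : Option String) (out : String) : Prop := out = gen_cf_logical_name_alt name sep
instance (name : String) (sep : Option String) (out : String) : Decidable (Spec_gen_cf_logical_name name sep out) := by unfold Spec_gen_cf_logical_name; infer_instance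

-- ===== CLAIM (what is proved, stated in full; the proofs are below) =====
def Claim_equal_gen_cf_logical_name : Prop := ∀ (name : String) (sep : Option String), Dom_gen_cf_logical_name name sep → Pre_gen_cf_logical_name name sep → Spec_gen_cf_logical_name name sep (gen_cf_logical_name name sep)

-- ===== LEMMAS AND PROOFS =====

-- both capitalizations are "uppercase the head"
def pvHeadUp : List Char → List Char
  | [] => []
  | c :: r => PySem.Chars.upperChar c :: r

theorem pvCapA_eq (item : List Char) : pvCapA item = pvHeadUp item := by
  match item with
  | [] => simp [pvCapA, pvHeadUp, PySem.Chars.upper]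
  | [c] => simp [pvCapA, pvHeadUp, PySem.Chars.upper]
  | c :: d :: r =>
      have h0 : (0:Int) ≤ (r.length:Int) + 1 := by positivity
      have h1 : (0:Int) ≤ 1 := by norm_num
      simp [pvCapA, pvHeadUp, PySem.List.pyGet?, PySem.List.pyIdx?, h0,
            PySem.List.slice_from (c :: d :: r) h1]

theorem pvCapB_eq (item : List Char) : pvCapB item = pvHeadUp item := by
  have h1 : (0:Int) ≤ 1 := by norm_num
  match item with
  | [] =>
      simp [pvCapB, pvHeadUp, PySem.Chars.upper,
            PySem.List.slice_to ([] : List Char) h1, PySem.List.slice_from ([] : List Char) h1]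
  | c :: r =>
      simp [pvCapB, pvHeadUp, PySem.Chars.upper,
            PySem.List.slice_to (c :: r) h1, PySem.List.slice_from (c :: r) h1]

-- a direct structural recursion computing Python's split on a one-character separator
def pvMySplit (s : Char) : List Char → List (List Char)
  | [] => [[]]
  | c :: r =>
      if c = s then [] :: pvMySplit s r
      else
        match pvMySplit s r with
        | [] => [[c]]
        | h :: t => (c :: h) :: t

theorem pvMySplit_ne_nil (s : Char) (l : List Char) : pvMySplit s l ≠ [] := by
  match l with
  | [] => simp [pvMySplit]
  | c :: r =>
      simp only [pvMySplit]
      split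
      · simp
      · split <;> simp

theorem pvSplitOn_go_spec (s : Char) :
    ∀ (fuel : Nat) (l cur : List Char) (acc : List (List Char)), l.length < fuel →
      PySem.Chars.splitOn.go [s] fuel l cur acc =
        acc.reverse ++
          (match pvMySplit s l with
           | [] => []
           | h :: t => (cur.reverse ++ h) :: t) := by
  intro fuel
  induction fuel with
  | zero => intro l cur acc h; omega
  | succ f ih =>
      intro l cur acc h
      match l with
      | [] =>
          rw [PySem.Chars.splitOn.go.eq_def]
          simp [pvMySplit]
      | c :: rest =>
          have hlen : rest.length < f := by
            simpa using Nat.lt_of_succ_lt_succ h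
          rw [PySem.Chars.splitOn.go.eq_def]
          by_cases hc : c = s
          · have hp : List.isPrefixOf [s] (c :: rest) = true := by
              simp [List.isPrefixOf, hc]
            simp only [hp, if_true]
            rw [show List.drop (List.length [s]) (c :: rest) = rest by simp]
            rw [ih rest [] (List.reverse cur :: acc) hlen]
            simp only [pvMySplit, hc, if_true]
            cases hm : pvMySplit s rest with
            | nil => exact absurd hm (pvMySplit_ne_nil s rest)
            | cons h' t' => simp
          · have hp : List.isPrefixOf [s] (c :: rest) = false := by
              simp [List.isPrefixOf]
              intro hh; exact absurd hh.symm hc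
            simp only [hp, Bool.false_eq_true, if_false]
            rw [ih rest (c :: cur) acc hlen]
            simp only [pvMySplit, hc, if_false]
            cases hm : pvMySplit s rest with
            | nil => exact absurd hm (pvMySplit_ne_nil s rest)
            | cons h' t' => simp

theorem pvSplitOn_eq (s : Char) (l : List Char) :
    PySem.Chars.splitOn l [s] = pvMySplit s l := by
  unfold PySem.Chars.splitOn
  rw [pvSplitOn_go_spec s (l.length + 1) l [] [] (Nat.lt_succ_self _)]
  cases hm : pvMySplit s l with
  | nil => exact absurd hm (pvMySplit_ne_nil s l)
  | cons h t => simp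

-- one split-capitalize-rejoin pass equals one flag scan on the single separator
theorem pvScan_single (s : Char) (l : List Char) :
    pvScan [s] true l = (pvMySplit s l).flatMap pvHeadUp ∧
      (∀ h t, pvMySplit s l = h :: t → pvScan [s] false l = h ++ t.flatMap pvHeadUp) := by
  induction l with
  | nil =>
      refine ⟨by simp [pvScan, pvMySplit, pvHeadUp], ?_⟩
      intro h t hm
      simp only [pvMySplit, List.cons.injEq] at hm
      obtain ⟨h1, h2⟩ := hm
      subst h1; subst h2
      simp [pvScan]
  | cons c r ih =>
      by_cases hc : c = s
      · subst hc
        refine ⟨?_, ?_⟩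
        · simp [pvScan, pvMySplit, ih.1, pvHeadUp]
        · intro h t hm
          simp only [pvMySplit, if_true, List.cons.injEq] at hm
          obtain ⟨h1, h2⟩ := hm
          subst h1; subst h2
          simp [pvScan, ih.1]
      · cases hm : pvMySplit s r with
        | nil => exact absurd hm (pvMySplit_ne_nil s r)
        | cons h' t' =>
            have h2 := ih.2 h' t' hm
            refine ⟨?_, ?_⟩
            · simp [pvScan, hc, pvMySplit, hm, h2, pvHeadUp]
            · intro h t hmm
              simp only [pvMySplit, hc, if_false, hm, List.cons.injEq] at hmm
              obtain ⟨h1, h3⟩ := hmm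
              subst h1; subst h3
              simp [pvScan, hc, h2]

-- character-level facts about upper-casing
theorem pv_lower_bounds (c : Char) (h : PySem.Chars.islower c = true) :
    97 ≤ c.toNat ∧ c.toNat ≤ 122 := by
  simp [PySem.Chars.islower, Char.le_def, UInt32.le_iff_toNat_le] at h
  exact ⟨h.1, h.2⟩

theorem pv_up_toNat (c : Char) (h : PySem.Chars.islower c = true) :
    (PySem.Chars.upperChar c).toNat = c.toNat - 32 := by
  have hb := pv_lower_bounds c h
  have hv : Nat.isValidChar (c.toNat - 32) := by left; omega
  simp [PySem.Chars.upperChar, h, Char.toNat_ofNat, hv]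

theorem pv_up_notmem (c : Char) (h : PySem.Chars.islower c = true) :
    PySem.Chars.upperChar c ∉ (['_', '-', '@', '.'] : List Char) := by
  have hb := pv_lower_bounds c h
  have ht := pv_up_toNat c h
  intro hm
  simp only [List.mem_cons, List.not_mem_nil, or_false] at hm
  rcases hm with hm | hm | hm | hm <;>
    · have := congrArg Char.toNat hm
      simp at this
      omega

theorem pv_up_islower_false (c : Char) :
    PySem.Chars.islower (PySem.Chars.upperChar c) = false := by
  by_cases h : PySem.Chars.islower c = true
  · have hb := pv_lower_bounds c h
    have ht := pv_up_toNat c h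
    simp only [PySem.Chars.islower, Char.le_def, UInt32.le_iff_toNat_le, Bool.and_eq_false_iff]
    left
    simp only [decide_eq_false_iff_not]
    show ¬ ('a'.val.toNat ≤ (PySem.Chars.upperChar c).toNat)
    simp only [show ('a').val.toNat = 97 from rfl, ht]
    omega
  · have h' : PySem.Chars.islower c = false := by simpa using h
    simp [PySem.Chars.upperChar, h']

theorem pv_up_fix (c : Char) (h : PySem.Chars.islower c = false) :
    PySem.Chars.upperChar c = c := by
  simp [PySem.Chars.upperChar, h]

theorem pv_up_idem (c : Char) :
    PySem.Chars.upperChar (PySem.Chars.upperChar c) = PySem.Chars.upperChar c :=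
  pv_up_fix _ (pv_up_islower_false c)

-- composing two scans: the separator sets union, the flags or
theorem pvScan_compose (S T : List Char)
    (hfix : ∀ c ∈ S ++ T, PySem.Chars.upperChar c = c)
    (hnm : ∀ c, PySem.Chars.islower c = true → PySem.Chars.upperChar c ∉ S ++ T) :
    ∀ (l : List Char) (b1 b2 : Bool),
      pvScan T b1 (pvScan S b2 l) = pvScan (S ++ T) (b1 || b2) l := by
  intro l
  induction l with
  | nil => intro b1 b2; simp [pvScan]
  | cons c r ih =>
      intro b1 b2
      by_cases hcS : c ∈ S
      · have hcST : c ∈ S ++ T := List.mem_append.mpr (Or.inl hcS)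
        have l1 : pvScan S b2 (c :: r) = pvScan S true r := by simp [pvScan, hcS]
        have r1 : pvScan (S ++ T) (b1 || b2) (c :: r) = pvScan (S ++ T) true r := by
          simp [pvScan, hcST]
        rw [l1, r1, ih b1 true]
        simp
      · set y := if b2 then PySem.Chars.upperChar c else c with hy
        have l1 : pvScan S b2 (c :: r) = y :: pvScan S false r := by
          simp [pvScan, hcS, ← hy]
        by_cases hyT : y ∈ T
        · have hcST : c ∈ S ++ T := by
            by_cases hl : PySem.Chars.islower c = true
            · cases b2 with
              | true =>
                  exact absurd (List.mem_append.mpr (Or.inr (by simpa [hy] using hyT)))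
                    (hnm c hl)
              | false => exact List.mem_append.mpr (Or.inr (by simpa [hy] using hyT))
            · have hfx := pv_up_fix c (by simpa using hl)
              have : y = c := by cases b2 <;> simp [hy, hfx]
              exact List.mem_append.mpr (Or.inr (this ▸ hyT))
          have l2 : pvScan T b1 (y :: pvScan S false r) = pvScan T true (pvScan S false r) := by
            simp [pvScan, hyT]
          have r1 : pvScan (S ++ T) (b1 || b2) (c :: r) = pvScan (S ++ T) true r := by
            simp [pvScan, hcST]
          rw [l1, l2, r1, ih true false]
          simp
        · have hcST : c ∉ S ++ T := by
            intro hc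
            rcases List.mem_append.mp hc with h | h
            · exact hcS h
            · have hfx := hfix c hc
              have : y = c := by cases b2 <;> simp [hy, hfx]
              exact hyT (this ▸ h)
          have emit : (if b1 then PySem.Chars.upperChar y else y)
              = (if (b1 || b2) then PySem.Chars.upperChar c else c) := by
            cases b1 <;> cases b2 <;> simp [hy, pv_up_idem]
          have l2 : pvScan T b1 (y :: pvScan S false r)
              = (if b1 then PySem.Chars.upperChar y else y) :: pvScan T false (pvScan S false r) := by
            simp [pvScan, hyT]
          have r1 : pvScan (S ++ T) (b1 || b2) (c :: r)
              = (if (b1 || b2) then PySem.Chars.upperChar c else c) :: pvScan (S ++ T) false r := by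
            simp [pvScan, hcST]
          rw [l1, l2, r1, emit, ih false false]
          simp

theorem pv_no_dash (S : List Char) (hd : '-' ∈ S)
    (hnm : ∀ c, PySem.Chars.islower c = true → PySem.Chars.upperChar c ∉ S) :
    ∀ (b : Bool) (l : List Char), '-' ∉ pvScan S b l := by
  intro b l
  induction l generalizing b with
  | nil => simp [pvScan]
  | cons c r ih =>
      by_cases hc : c ∈ S
      · simpa [pvScan, hc] using ih true
      · simp only [pvScan, hc, if_false, List.mem_cons, not_or]
        refine ⟨?_, ih false⟩
        intro he
        cases b with
        | false =>
            simp at he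
            exact hc (he ▸ hd)
        | true =>
            simp at he
            by_cases hl : PySem.Chars.islower c = true
            · exact hnm c hl (he ▸ hd)
            · have := pv_up_fix c (by simpa using hl)
              rw [this] at he
              exact hc (he ▸ hd)

theorem pvReplace_go_id :
    ∀ (fuel : Nat) (l acc : List Char), l.length ≤ fuel → '-' ∉ l →
      PySem.Chars.replace.go ['-'] [] fuel l acc = acc.reverse ++ l := by
  intro fuel
  induction fuel with
  | zero =>
      intro l acc hlen hnd
      have : l = [] := List.eq_nil_of_length_eq_zero (Nat.le_zero.mp hlen)
      subst this
      rw [PySem.Chars.replace.go.eq_def]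
  | succ f ih =>
      intro l acc hlen hnd
      match l with
      | [] =>
          rw [PySem.Chars.replace.go.eq_def]
          simp
      | c :: t =>
          have hc : c ≠ '-' := by
            intro h; exact hnd (h ▸ List.mem_cons_self)
          have hp : List.isPrefixOf ['-'] (c :: t) = false := by
            simp [List.isPrefixOf]
            intro hh; exact hc hh.symm
          rw [PySem.Chars.replace.go.eq_def]
          simp only [hp, Bool.false_eq_true, if_false]
          rw [ih t (c :: acc) (by simpa using Nat.lt_of_succ_lt_succ (Nat.lt_succ_of_le hlen))
              (fun hm => hnd (List.mem_cons_of_mem c hm))]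
          simp

theorem pvReplace_id (l : List Char) (h : '-' ∉ l) :
    PySem.Chars.replace l ['-'] [] = l := by
  unfold PySem.Chars.replace
  simp only [List.isEmpty, Bool.false_eq_true, if_false]
  rw [pvReplace_go_id l.length l [] le_rfl h]
  simp

theorem pvJoin_nil (ps : List (List Char)) :
    PySem.Chars.join [] ps = ps.flatMap id := by
  induction ps with
  | nil => simp [PySem.Chars.join, List.intercalate]
  | cons h t ih =>
      cases t with
      | nil => simp [PySem.Chars.join, List.intercalate]
      | cons h2 t2 => simp_all [PySem.Chars.join, List.intercalate]

-- one pass of A's loop body on a single-character separator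
theorem pvPass_eq (s : Char) (nm : List Char) :
    ((PySem.Chars.split? nm [s]).getD []).foldl (fun cf item => cf ++ pvCapA item) [] =
      pvScan [s] true nm := by
  have hs : PySem.Chars.split? nm [s] = some (PySem.Chars.splitOn nm [s]) := by
    simp [PySem.Chars.split?]
  rw [hs]
  simp only [Option.getD_some]
  rw [PySem.List.foldl_append_eq_flatMap, pvSplitOn_eq, List.nil_append, (pvScan_single s nm).1]
  exact List.flatMap_congr (fun x _ => pvCapA_eq x)

-- the set facts for the three compositions
theorem pv_hfix_big : ∀ c ∈ (['_', '-', '@', '.'] : List Char), PySem.Chars.upperChar c = c := by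
  intro c hc; fin_cases hc <;> decide

-- ===== VERDICT (by name: the statement is the Claim_ definition above) =====
theorem gen_cf_logical_name_spec : Claim_equal_gen_cf_logical_name := by
  intro name sep hdom hpre
  unfold Spec_gen_cf_logical_name
  cases sep with
  | some s =>
      show gen_cf_logical_name name (some s) = gen_cf_logical_name_alt name (some s)
      simp only [gen_cf_logical_name, gen_cf_logical_name_alt, List.foldl]
      congr 1
      congr 1
      rw [PySem.List.foldl_append_eq_flatMap, List.nil_append, pvJoin_nil, List.flatMap_map]
      exact List.flatMap_congr (fun x _ => by simp [pvCapA_eq, pvCapB_eq])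
  | none =>
      show gen_cf_logical_name name none = gen_cf_logical_name_alt name none
      have hsub12 : ∀ c ∈ (['_'] ++ ['-'] : List Char), c ∈ (['_', '-', '@', '.'] : List Char) := by
        intro c hc; fin_cases hc <;> decide
      have hsub123 : ∀ c ∈ (['_', '-'] ++ ['@'] : List Char), c ∈ (['_', '-', '@', '.'] : List Char) := by
        intro c hc; fin_cases hc <;> decide
      have hsub1234 : ∀ c ∈ (['_', '-', '@'] ++ ['.'] : List Char), c ∈ (['_', '-', '@', '.'] : List Char) := by
        intro c hc; fin_cases hc <;> decide
      have hnm_big : ∀ c, PySem.Chars.islower c = true →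
          PySem.Chars.upperChar c ∉ (['_', '-', '@', '.'] : List Char) := pv_up_notmem
      simp only [gen_cf_logical_name, gen_cf_logical_name_alt, List.foldl]
      rw [pvPass_eq, pvPass_eq, pvPass_eq, pvPass_eq]
      rw [pvScan_compose ['_'] ['-']
            (fun c hc => pv_hfix_big c (hsub12 c hc))
            (fun c hl hm => hnm_big c hl (hsub12 _ hm)) name.toList true true]
      simp only [List.cons_append, List.nil_append, Bool.or_self]
      rw [pvScan_compose ['_', '-'] ['@']
            (fun c hc => pv_hfix_big c (hsub123 c hc))
            (fun c hl hm => hnm_big c hl (hsub123 _ hm)) name.toList true true]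
      simp only [List.cons_append, List.nil_append, Bool.or_self]
      rw [pvScan_compose ['_', '-', '@'] ['.']
            (fun c hc => pv_hfix_big c (hsub1234 c hc))
            (fun c hl hm => hnm_big c hl (hsub1234 _ hm)) name.toList true true]
      simp only [List.cons_append, List.nil_append, Bool.or_self]
      rw [pvReplace_id _ (pv_no_dash ['_', '-', '@', '.'] (by simp) hnm_big true name.toList)]
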